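-- pv_equiv track=rewrite | github.com/MalenaMoralesDelfino/tps_laboratorio_1 | TP5/trabajo_5.py | calcular_min_genero
-- ===== SOURCE A (Python) =====
-- def validar_datos_dicc(dicc: dict,key:str)->str:
--     '''
--     Valida si un diccionario no esta vacio y contiene una clave.
--     Parámetros:
--         - dicc_heroe (dict): El diccionario que representa a un héroe.
--         - key (str): La clave que se debe validar.
--     Retorno:
--         - bool: True si el diccionario no está vacío y contiene la clave, False en caso contrario.
--     '''
--     if not dicc or key not in dicc:  #valida que dic no este vacio y key se encuentre en las keys
--         return False
--     return True
--
-- def es_genero(dicc: dict, genero:str)->bool: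
--     '''
--     Verifica si un héroe cumple con un género específico.
--     Parámetros:
--         - dicc (dict): El diccionario que representa al héroe.
--         - genero (str): El género a verificar (M, F o NB).
--     Returns:
--         - bool: True si el héroe cumple con el género especificado, False en caso contrario.
--     '''
--     if validar_datos_dicc(dicc,"genero"):
--         if dicc["genero"] == genero:
--             return True
--     else:
--         return False
--
-- def calcular_min_genero(lista:list, atributo:str, genero:str)->str:
--     '''
--     Encuentra al héroe con el valor mínimo de un atributo específico, filtrando por género.
--     Parámetros:
--         - lista (list): La lista de héroes representados como diccionarios.
--         - atributo (str): El atributo por el cual se buscará el valor mínimo.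
--         - genero (str): El género (M, F o NB) por el cual se desea filtrar a los héroes.
--
--     Returns:
--         - dict: El diccionario del héroe o heroína con el valor mínimo del atributo especificado y el género deseado.
--         - None: Si no se encuentra un héroe o heroína que cumpla con el género especificado o si la lista está vacía.
--     '''
--     valor_min = None
--     heroe_min = None  # Inicializar como None para manejar casos en los que no se encuentra un héroe
--     for heroe in lista:
--         if es_genero(heroe,genero):  # Filtrar por género
--             valor = heroe.get(atributo)
--             if valor is not None and (valor_min is None or valor < valor_min):
--                 valor_min = valor
--                 heroe_min = heroe
--
--     return heroe_min
-- ===== SOURCE B (Python) =====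
-- def validar_datos_dicc(dicc: dict, key: str) -> str:
--     if not dicc or key not in dicc:
--         return False
--     return True
--
--
-- def es_genero(dicc: dict, genero: str) -> bool:
--     if validar_datos_dicc(dicc, "genero"):
--         if dicc["genero"] == genero:
--             return True
--     else:
--         return False
--
--
-- def calcular_min_genero(lista: list, atributo: str, genero: str) -> str:
--     # filter + stable sort + first element instead of a running-minimum loop
--     candidatos = [h for h in lista if es_genero(h, genero) and h.get(atributo) is not None]
--     ordenados = sorted(candidatos, key=lambda h: h[atributo])
--     return ordenados[0] if ordenados else None
-- ===== Notes on version B (the rewrite author's own statement) =====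
-- stated objective: alternative
-- what changed: A's single running-minimum loop with two tracking variables is replaced by filter-then-stable-sort-then-take-first; stability of sorted preserves A's first-minimum tie-breaking.
import Mathlib
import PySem

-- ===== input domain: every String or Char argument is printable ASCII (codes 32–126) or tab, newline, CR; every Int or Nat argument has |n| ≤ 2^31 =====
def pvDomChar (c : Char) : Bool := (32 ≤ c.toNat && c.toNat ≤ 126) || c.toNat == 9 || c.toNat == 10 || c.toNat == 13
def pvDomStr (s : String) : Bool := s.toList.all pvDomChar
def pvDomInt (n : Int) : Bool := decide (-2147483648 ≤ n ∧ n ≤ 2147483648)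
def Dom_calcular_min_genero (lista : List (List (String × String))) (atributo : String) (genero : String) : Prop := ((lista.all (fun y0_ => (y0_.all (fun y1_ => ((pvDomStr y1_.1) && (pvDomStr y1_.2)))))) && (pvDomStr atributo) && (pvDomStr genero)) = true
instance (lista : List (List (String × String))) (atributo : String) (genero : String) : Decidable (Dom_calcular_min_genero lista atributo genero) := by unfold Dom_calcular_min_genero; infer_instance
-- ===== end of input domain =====

-- B replaces A's running-minimum loop by filter + stable sort + take-first (alternative decomposition, same result).

-- ===== PORT A =====
-- dict.get(k) on an association list: first match (the fixed dict convention)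
def pvGet (h : List (String × String)) (k : String) : Option String :=
  (h.find? (fun p => p.1 == k)).map (·.2)

def validar_datos_dicc (dicc : List (String × String)) (key : String) : Bool :=
  if dicc.isEmpty || !(dicc.any (fun p => p.1 == key)) then false else true

-- Python's es_genero returns True/False/None; None is falsy where A tests it, so Bool with none→false is exact
def es_genero (dicc : List (String × String)) (genero : String) : Bool :=
  if validar_datos_dicc dicc "genero" then
    match pvGet dicc "genero" with
    | some v => v == genero
    | none => false
  else false

def calcular_min_genero (lista : List (List (String × String))) (atributo : String) (genero : String) : Option (List (String × String)) :=
  (lista.foldl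
    (fun (st : Option String × Option (List (String × String))) heroe =>
      if es_genero heroe genero then
        match pvGet heroe atributo with
        | some valor =>
          match st.1 with
          | none => (some valor, some heroe)
          | some valor_min => if valor < valor_min then (some valor, some heroe) else st
        | none => st
      else st)
    (none, none)).2

-- ===== PORT B =====
def calcular_min_genero_alt (lista : List (List (String × String))) (atributo : String) (genero : String) : Option (List (String × String)) :=
  let candidatos := lista.filter (fun h => es_genero h genero && (pvGet h atributo).isSome)
  let ordenados := PySem.List.sorted candidatos (fun h => (pvGet h atributo).getD "") false
  ordenados.head?

-- ===== PRECONDITION & SPEC =====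
def Spec_calcular_min_genero (lista : List (List (String × String))) (atributo : String) (genero : String) (out : Option (List (String × String))) : Prop := out = calcular_min_genero_alt lista atributo genero
instance (lista : List (List (String × String))) (atributo : String) (genero : String) (out : Option (List (String × String))) : Decidable (Spec_calcular_min_genero lista atributo genero out) := by unfold Spec_calcular_min_genero; infer_instance

-- ===== CLAIM (what is proved, stated in full; the proofs are below) =====
def Claim_equal_calcular_min_genero : Prop := ∀ (lista : List (List (String × String))) (atributo : String) (genero : String), Dom_calcular_min_genero lista atributo genero → Spec_calcular_min_genero lista atributo genero (calcular_min_genero lista atributo genero)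

-- ===== LEMMAS AND PROOFS =====

-- the common "first strict minimum" selector both sides reduce to
def pvSelStep (atributo : String) (o : Option (List (String × String))) (x : List (String × String)) : Option (List (String × String)) :=
  match o with
  | none => some x
  | some m => if (pvGet x atributo).getD "" < (pvGet m atributo).getD "" then some x else some m

theorem pvA_step (atributo genero : String) (x : List (String × String))
    (hm : Option (List (String × String))) :
    (if es_genero x genero = true then
      match pvGet x atributo with
      | some valor =>
        match (hm.map (fun h => (pvGet h atributo).getD "")) with
        | none => (some valor, some x)
        | some valor_min =>
          if valor < valor_min then (some valor, some x)
          else (hm.map (fun h => (pvGet h atributo).getD ""), hm)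
      | none => (hm.map (fun h => (pvGet h atributo).getD ""), hm)
    else (hm.map (fun h => (pvGet h atributo).getD ""), hm))
    = ((if (es_genero x genero && (pvGet x atributo).isSome) = true then pvSelStep atributo hm x else hm).map
          (fun h => (pvGet h atributo).getD ""),
       if (es_genero x genero && (pvGet x atributo).isSome) = true then pvSelStep atributo hm x else hm) := by
  by_cases hg : es_genero x genero
  · cases hv : pvGet x atributo with
    | none => simp [hg]
    | some v =>
      cases hm with
      | none => simp [hg, hv, pvSelStep]
      | some m =>
        by_cases hlt : v < (pvGet m atributo).getD ""
        · simp [hg, hv, pvSelStep, hlt]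
        · simp [hg, hv, pvSelStep, hlt]
  · simp [hg]

theorem pvA_fold (atributo genero : String) (l : List (List (String × String)))
    (hm : Option (List (String × String))) :
    (l.foldl
      (fun (st : Option String × Option (List (String × String))) heroe =>
        if es_genero heroe genero then
          match pvGet heroe atributo with
          | some valor =>
            match st.1 with
            | none => (some valor, some heroe)
            | some valor_min => if valor < valor_min then (some valor, some heroe) else st
          | none => st
        else st)
      (hm.map (fun h => (pvGet h atributo).getD ""), hm)).2
    = (l.filter (fun h => es_genero h genero && (pvGet h atributo).isSome)).foldl (pvSelStep atributo) hm := by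
  induction l generalizing hm with
  | nil => rfl
  | cons x t ih =>
    simp only [List.foldl_cons, List.filter_cons]
    rw [pvA_step]
    by_cases hc : (es_genero x genero && (pvGet x atributo).isSome) = true
    · rw [if_pos hc, if_pos hc, List.foldl_cons]
      exact ih (pvSelStep atributo hm x)
    · rw [if_neg hc, if_neg hc]
      exact ih hm

theorem pvHead_insertBy {α : Type} (bef : α → α → Bool) (x : α) (ys : List α) :
    (PySem.List.insertBy bef x ys).head? =
      some (match ys with
            | [] => x
            | y :: _ => if bef x y then x else y) := by
  cases ys with
  | nil => rfl
  | cons y t =>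
    by_cases h : bef x y
    · simp [PySem.List.insertBy, h]
    · simp [PySem.List.insertBy, h]

theorem pvB_fold (atributo : String) (l : List (List (String × String)))
    (acc : List (List (String × String))) :
    (l.foldl
      (fun a x => PySem.List.insertBy
        (fun a b => decide ((pvGet a atributo).getD "" < (pvGet b atributo).getD "")) x a) acc).head?
    = l.foldl (pvSelStep atributo) acc.head? := by
  induction l generalizing acc with
  | nil => rfl
  | cons x t ih =>
    simp only [List.foldl_cons]
    rw [ih]
    congr 1
    rw [pvHead_insertBy]
    cases acc with
    | nil => rfl
    | cons y ys =>
      simp only [pvSelStep, List.head?]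
      by_cases h : (pvGet x atributo).getD "" < (pvGet y atributo).getD "" <;> simp [h]

-- ===== VERDICT (by name: the statement is the Claim_ definition above) =====
theorem calcular_min_genero_spec : Claim_equal_calcular_min_genero := by
  intro lista atributo genero _
  unfold Spec_calcular_min_genero calcular_min_genero calcular_min_genero_alt
  simp only []
  rw [PySem.List.sorted_eq_foldl_insertBy, pvB_fold]
  have := pvA_fold atributo genero lista none
  simpa using this
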